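-- pv_equiv track=rewrite | github.com/squishyjs/daily-solve | Python/seatNumbering.py | solve
-- ===== SOURCE A (Python) =====
-- def solve(seat_number: int) -> str:
--     lower_double = [int(i) for i in range(1, 11)]
--     lower_single = [int(i) for i in range(11, 16)]
--     upper_double = [int(i) for i in range(16, 26)]
--     upper_single = [int(i) for i in range(26, 31)]
--
--     if seat_number in lower_double:
--         return "Lower Double"
--     if seat_number in lower_single:
--         return "Lower Single"
--     if seat_number in upper_double:
--         return "Upper Double"
--     if seat_number in upper_single:
--         return "Upper Single"
-- ===== SOURCE B (Python) =====
-- def solve(seat_number: int) -> str: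
--     if 1 <= seat_number <= 30:
--         deck = "Lower" if seat_number <= 15 else "Upper"
--         kind = "Double" if (seat_number - 1) % 15 < 10 else "Single"
--         return deck + " " + kind
-- ===== Notes on version B (the rewrite author's own statement) =====
-- stated objective: alternative
-- what changed: Replaces the four range-lists and sequential membership scans with a closed-form arithmetic classification: a range guard, a <=15 test picking Lower/Upper, and (seat-1) % 15 < 10 picking Double/Single, concatenating the two words.
import Mathlib
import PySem

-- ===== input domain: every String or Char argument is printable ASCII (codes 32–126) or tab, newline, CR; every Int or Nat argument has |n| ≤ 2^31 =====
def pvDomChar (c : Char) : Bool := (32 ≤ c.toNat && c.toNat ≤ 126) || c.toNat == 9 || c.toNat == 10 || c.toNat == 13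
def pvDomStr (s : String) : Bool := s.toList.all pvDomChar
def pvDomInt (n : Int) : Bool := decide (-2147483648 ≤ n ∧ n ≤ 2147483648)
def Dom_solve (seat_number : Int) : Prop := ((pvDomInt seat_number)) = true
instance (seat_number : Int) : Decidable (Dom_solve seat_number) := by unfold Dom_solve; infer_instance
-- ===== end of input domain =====

-- B replaces A's four range-lists and sequential membership scans with a
-- closed-form arithmetic classification (range guard, <=15 deck test,
-- (n-1) % 15 < 10 berth test, word concatenation); alternative, same cost.

-- ===== PORT A =====
-- literal port: four range-lists, then four sequential membership tests
def solve (seat_number : Int) : Option String :=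
  let lower_double := (PySem.List.pyRange 1 11 1).map (fun i => i)
  let lower_single := (PySem.List.pyRange 11 16 1).map (fun i => i)
  let upper_double := (PySem.List.pyRange 16 26 1).map (fun i => i)
  let upper_single := (PySem.List.pyRange 26 31 1).map (fun i => i)
  if seat_number ∈ lower_double then some "Lower Double"
  else if seat_number ∈ lower_single then some "Lower Single"
  else if seat_number ∈ upper_double then some "Upper Double"
  else if seat_number ∈ upper_single then some "Upper Single"
  else none

-- ===== PORT B =====
-- port of Source B: range guard, then deck and berth chosen arithmetically
def solve_alt (seat_number : Int) : Option String :=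
  if 1 ≤ seat_number ∧ seat_number ≤ 30 then
    let deck := if seat_number ≤ 15 then "Lower" else "Upper"
    let kind := if PySem.Int.mod (seat_number - 1) 15 < 10 then "Double" else "Single"
    some (deck ++ " " ++ kind)
  else none

-- ===== PRECONDITION & SPEC =====
def Spec_solve (seat_number : Int) (out : Option String) : Prop := out = solve_alt seat_number
instance (seat_number : Int) (out : Option String) : Decidable (Spec_solve seat_number out) := by unfold Spec_solve; infer_instance

-- ===== CLAIM =====
def Claim_equal_solve : Prop := ∀ (seat_number : Int), Dom_solve seat_number → Spec_solve seat_number (solve seat_number)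

-- ===== LEMMAS AND PROOFS =====

theorem solve_eq_alt (n : Int) : solve n = solve_alt n := by
  by_cases h : 1 ≤ n ∧ n ≤ 30
  · obtain ⟨h1, h2⟩ := h
    interval_cases n <;> decide
  · have hA : solve n = none := by
      simp only [solve, List.map_id', PySem.List.mem_pyRange_one]
      split_ifs with a b c d <;> first | rfl | omega
    have hB : solve_alt n = none := by
      unfold solve_alt
      rw [if_neg (by omega)]
    rw [hA, hB]

-- ===== VERDICT =====
theorem solve_spec : Claim_equal_solve := by
  intro n _; exact solve_eq_alt n
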